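-- pv_equiv track=rewrite | github.com/employer1/apprendre-python | 6.18.py | eleMax
-- ===== SOURCE A (Python) =====
-- def eleMax(liste, debut=0, fin=None):
--     if fin is None:
--         fin = len(liste)
--     sous_liste = liste[debut:fin]
--     max = sous_liste[0]
--     for item in sous_liste:
--         if item > max:
--             max = item
--     return max
-- ===== SOURCE B (Python) =====
-- def _clamp(i, n):
--     if i < 0:
--         i += n
--     return 0 if i < 0 else (n if i > n else i)
--
--
-- def _max_range(liste, lo, hi):
--     if hi - lo <= 1:
--         return liste[lo]
--     mid = (lo + hi) // 2
--     left = _max_range(liste, lo, mid)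
--     right = _max_range(liste, mid, hi)
--     return left if left >= right else right
--
--
-- def eleMax(liste, debut=0, fin=None):
--     n = len(liste)
--     if fin is None:
--         fin = n
--     return _max_range(liste, _clamp(debut, n), _clamp(fin, n))
-- ===== Notes on version B (the rewrite author's own statement) =====
-- stated objective: alternative
-- what changed: Replaces the slice-copy plus linear scan with midpoint divide-and-conquer over the normalized index interval, combining halves by taking the larger; no sublist is materialized.
import Mathlib
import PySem

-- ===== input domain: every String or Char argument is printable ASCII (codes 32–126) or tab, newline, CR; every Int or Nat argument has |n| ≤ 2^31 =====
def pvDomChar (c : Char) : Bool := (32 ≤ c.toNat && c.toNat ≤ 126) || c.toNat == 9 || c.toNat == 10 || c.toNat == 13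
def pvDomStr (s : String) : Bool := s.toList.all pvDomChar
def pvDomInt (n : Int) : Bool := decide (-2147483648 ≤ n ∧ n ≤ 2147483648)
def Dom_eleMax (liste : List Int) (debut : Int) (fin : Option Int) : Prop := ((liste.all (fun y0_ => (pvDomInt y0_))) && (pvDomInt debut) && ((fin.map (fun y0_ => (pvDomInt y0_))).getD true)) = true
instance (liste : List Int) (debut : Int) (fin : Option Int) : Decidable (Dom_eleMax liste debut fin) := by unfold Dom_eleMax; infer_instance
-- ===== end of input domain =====

-- B replaces the slice-copy + linear scan with midpoint divide-and-conquer over the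
-- normalized index interval; same result (max of the sublist), no sublist materialized.

-- ===== PORT A =====
-- liste[debut:fin] via PySem.List.slice; the first-element read via pyGet? (the getD default is never used inside Pre_,
-- where the index is in range; Python raises IndexError outside); the for-loop is the foldl.
def eleMax (liste : List Int) (debut : Int) (fin : Option Int) : Int :=
  let fin' : Int := fin.getD (liste.length : Int)
  let sous := PySem.List.slice liste (some debut) (some fin')
  let m0 := (PySem.List.pyGet? sous 0).getD 0
  sous.foldl (fun mx item => if item > mx then item else mx) m0

-- ===== PORT B =====
-- Source B's _clamp: Python slice-bound normalization, computed by hand.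
def pvClamp (i : Int) (n : Nat) : Nat :=
  let i' := if i < 0 then i + n else i
  if i' < 0 then 0 else if i' > (n : Int) then n else i'.toNat

-- Source B's _max_range: divide and conquer on the half-open interval lo..hi; liste[lo] via pyGet? (the getD default is unused inside Pre_).
def eleMaxGo (liste : List Int) (lo hi : Nat) : Int :=
  if h : hi ≤ lo + 1 then (PySem.List.pyGet? liste (lo : Int)).getD 0
  else
    let mid := (lo + hi) / 2
    let left := eleMaxGo liste lo mid
    let right := eleMaxGo liste mid hi
    if left ≥ right then left else right
termination_by hi - lo
decreasing_by all_goals omega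

def eleMax_alt (liste : List Int) (debut : Int) (fin : Option Int) : Int :=
  let n := liste.length
  let fin' : Int := fin.getD (n : Int)
  eleMaxGo liste (pvClamp debut n) (pvClamp fin' n)

-- ===== PRECONDITION & SPEC =====
-- Pre_ excludes exactly the inputs whose normalized slice liste[debut:fin] is empty: there A's
-- first-element read raises IndexError.
def Pre_eleMax (liste : List Int) (debut : Int) (fin : Option Int) : Prop :=
  let n : Int := liste.length
  let f : Int := fin.getD n
  max 0 (min n (if debut < 0 then debut + n else debut)) <
    max 0 (min n (if f < 0 then f + n else f))
instance (liste : List Int) (debut : Int) (fin : Option Int) : Decidable (Pre_eleMax liste debut fin) := by unfold Pre_eleMax; infer_instance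

def pvWitness_eleMax : List Int × Int × Option Int := ([3, -1, 7, 7, 2], 1, some 4)

def Spec_eleMax (liste : List Int) (debut : Int) (fin : Option Int) (out : Int) : Prop := out = eleMax_alt liste debut fin
instance (liste : List Int) (debut : Int) (fin : Option Int) (out : Int) : Decidable (Spec_eleMax liste debut fin out) := by unfold Spec_eleMax; infer_instance

-- ===== CLAIM (what is proved, stated in full; the proofs are below) =====
def Claim_equal_eleMax : Prop := ∀ (liste : List Int) (debut : Int) (fin : Option Int), Dom_eleMax liste debut fin → Pre_eleMax liste debut fin → Spec_eleMax liste debut fin (eleMax liste debut fin)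

-- ===== LEMMAS AND PROOFS =====

theorem pvClamp_eq_clampIdx (i : Int) (n : Nat) : pvClamp i n = PySem.List.clampIdx n i := by
  simp only [pvClamp, PySem.List.clampIdx]
  split_ifs <;> omega

theorem pre_lt {liste : List Int} {debut : Int} {fin : Option Int}
    (h : Pre_eleMax liste debut fin) :
    pvClamp debut liste.length < pvClamp (fin.getD (liste.length : Int)) liste.length := by
  simp only [Pre_eleMax] at h
  simp only [pvClamp]
  split_ifs at h ⊢ <;> try omega

theorem pvClamp_le (i : Int) (n : Nat) : pvClamp i n ≤ n := by
  simp only [pvClamp]; split_ifs <;> omega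

-- the loop body of A equals max
theorem step_eq_max (b x : Int) : (if x > b then x else b) = max b x := by
  rw [max_def]; split_ifs <;> omega

theorem foldl_step_eq_max (xs : List Int) (b : Int) :
    xs.foldl (fun mx item => if item > mx then item else mx) b = xs.foldl max b := by
  simp only [step_eq_max]

theorem foldl_max_max (l : List Int) (a b : Int) :
    l.foldl max (max a b) = max a (l.foldl max b) := by
  induction l generalizing a b with
  | nil => rfl
  | cons c l ih =>
      simp only [List.foldl]
      rw [max_assoc, ih]

theorem ge_ite_eq_max (a b : Int) : (if a ≥ b then a else b) = max a b := by
  simp only [max_def]; split_ifs <;> omega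

-- characterization of B's recursion: max over the segment [lo, hi)
theorem go_spec : ∀ (k : Nat) (L : List Int) (lo hi : Nat), hi - lo ≤ k → lo < hi → hi ≤ L.length →
    eleMaxGo L lo hi = ((L.drop (lo + 1)).take (hi - (lo + 1))).foldl max (L.getD lo 0) := by
  intro k
  induction k with
  | zero => intro L lo hi hk h1 _; omega
  | succ k ih =>
    intro L lo hi hk h1 h2
    rw [eleMaxGo]
    by_cases hb : hi ≤ lo + 1
    · have he : hi = lo + 1 := by omega
      subst he
      have hlo : lo < L.length := by omega
      simp [PySem.List.pyGet?_natCast, List.getD, hlo, List.getElem?_eq_getElem]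
    · simp only [hb, dite_false]
      have hm1 : lo < (lo + hi) / 2 := by omega
      have hm2 : (lo + hi) / 2 < hi := by omega
      set mid := (lo + hi) / 2 with hmid
      rw [ih L lo mid (by omega) hm1 (by omega), ih L mid hi (by omega) hm2 h2]
      have hmidlt : mid < L.length := by omega
      have hsplit : (L.drop (lo + 1)).take (hi - (lo + 1)) =
          (L.drop (lo + 1)).take (mid - (lo + 1)) ++
            L.getD mid 0 :: (L.drop (mid + 1)).take (hi - (mid + 1)) := by
        have h3 : hi - (lo + 1) = (mid - (lo + 1)) + (hi - mid) := by omega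
        rw [h3, List.take_add, List.drop_drop]
        congr 1
        have h4 : lo + 1 + (mid - (lo + 1)) = mid := by omega
        rw [h4]
        have h5 : L.drop mid = L[mid] :: L.drop (mid + 1) := List.drop_eq_getElem_cons hmidlt
        rw [h5]
        have h6 : hi - mid = (hi - (mid + 1)) + 1 := by omega
        rw [h6, List.take_succ_cons]
        congr 1
        simp [List.getD, List.getElem?_eq_getElem hmidlt]
      rw [hsplit, List.foldl_append]
      simp only [List.foldl]
      rw [foldl_max_max]
      exact ge_ite_eq_max _ _

-- ===== VERDICT (by name: the statement is the Claim_ definition above) =====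
theorem eleMax_spec : Claim_equal_eleMax := by
  intro liste debut fin _ hpre
  simp only [Spec_eleMax, eleMax, eleMax_alt]
  set n := liste.length with hn
  set f : Int := fin.getD (n : Int) with hf
  set lo := pvClamp debut n with hlo
  set hi := pvClamp f n with hhi
  have hlt : lo < hi := pre_lt hpre
  have hhin : hi ≤ n := pvClamp_le f n
  have hlon : lo < n := by omega
  -- the slice is exactly the segment [lo, hi)
  have hslice : PySem.List.slice liste (some debut) (some f) = (liste.drop lo).take (hi - lo) := by
    simp only [PySem.List.slice, hlo, hhi, pvClamp_eq_clampIdx]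
    rfl
  rw [hslice]
  have hseg : (liste.drop lo).take (hi - lo) =
      liste.getD lo 0 :: (liste.drop (lo + 1)).take (hi - (lo + 1)) := by
    have h5 : liste.drop lo = liste[lo] :: liste.drop (lo + 1) := List.drop_eq_getElem_cons hlon
    rw [h5]
    have h6 : hi - lo = (hi - (lo + 1)) + 1 := by omega
    rw [h6, List.take_succ_cons]
    congr 1
    simp [List.getD, List.getElem?_eq_getElem hlon]
  rw [hseg]
  rw [go_spec (hi - lo) liste lo hi (by omega) hlt hhin]
  have hm0 : (PySem.List.pyGet?
      (liste.getD lo 0 :: (liste.drop (lo + 1)).take (hi - (lo + 1))) 0).getD 0 =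
      liste.getD lo 0 := by
    simp [PySem.List.pyGet?, PySem.List.pyIdx?]
  rw [hm0]
  simp only [List.foldl]
  rw [if_neg (lt_irrefl _), foldl_step_eq_max]
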